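-- pv_equiv track=rewrite | github.com/duytienkaka/Phan-loai-nam-An-duoc-hay-doc- | Phan-loai-nam/main.py | detect_id_column
-- ===== SOURCE A (Python) =====
-- def detect_id_column(columns):
--     lowered = [c.lower() for c in columns]
--     if "id" in lowered:
--         return columns[lowered.index("id")]
--     for c in columns:
--         lc = c.lower()
--         if lc.endswith("_id") or lc in ["sample_id", "mushroom_id", "index"]:
--             return c
--     return None
-- ===== SOURCE B (Python) =====
-- def detect_id_column(columns):
--     id_match = None
--     fallback = None
--     for c in columns:
--         lc = c.lower()
--         if lc == "id":
--             if id_match is None: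
--                 id_match = c
--         elif fallback is None and (lc.endswith("_id") or lc in ("sample_id", "mushroom_id", "index")):
--             fallback = c
--     return id_match if id_match is not None else fallback
-- ===== Notes on version B (the rewrite author's own statement) =====
-- stated objective: simpler
-- what changed: Single pass keeping two accumulators (first exact 'id' match and first fallback match) instead of building a lowered copy of the list and scanning it up to three times (membership test, .index, fallback loop).
import Mathlib
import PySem

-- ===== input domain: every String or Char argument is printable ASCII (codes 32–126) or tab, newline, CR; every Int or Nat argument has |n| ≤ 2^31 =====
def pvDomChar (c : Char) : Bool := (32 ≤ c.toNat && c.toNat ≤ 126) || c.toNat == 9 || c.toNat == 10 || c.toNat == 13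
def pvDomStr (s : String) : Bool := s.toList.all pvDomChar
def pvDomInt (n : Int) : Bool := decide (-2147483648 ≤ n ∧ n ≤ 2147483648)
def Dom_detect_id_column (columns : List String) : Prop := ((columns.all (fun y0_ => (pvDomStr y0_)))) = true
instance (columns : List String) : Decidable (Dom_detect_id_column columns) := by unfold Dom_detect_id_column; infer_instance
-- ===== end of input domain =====

-- B does one pass with two accumulators instead of A's lowered copy plus up-to-three scans; simpler, same behaviour.

-- ===== PORT A =====
-- A's fallback for-loop with early return, as structural recursion
def detectALoop : List String → Option String
  | [] => none
  | c :: rest =>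
    let lc := PySem.Str.lower c
    if PySem.Str.endswith lc "_id" || ["sample_id", "mushroom_id", "index"].contains lc then
      some c
    else detectALoop rest

def detect_id_column (columns : List String) : Option String :=
  let lowered := columns.map (fun c => PySem.Str.lower c)
  if lowered.contains "id" then
    match PySem.List.index? lowered "id" with
    | some i => PySem.List.pyGet? columns (i : Int)   -- columns[lowered.index("id")]; in range here
    | none => none
  else
    detectALoop columns

-- ===== PORT B =====
def detectBStep (acc : Option String × Option String) (c : String) : Option String × Option String :=
  let lc := PySem.Str.lower c
  if lc == "id" then
    if acc.1.isNone then (some c, acc.2) else acc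
  else if acc.2.isNone &&
      (PySem.Str.endswith lc "_id" || ["sample_id", "mushroom_id", "index"].contains lc) then
    (acc.1, some c)
  else acc

def detect_id_column_alt (columns : List String) : Option String :=
  let acc := columns.foldl detectBStep (none, none)
  match acc.1 with
  | some s => some s
  | none => acc.2

-- ===== PRECONDITION & SPEC =====
def Spec_detect_id_column (columns : List String) (out : Option String) : Prop := out = detect_id_column_alt columns
instance (columns : List String) (out : Option String) : Decidable (Spec_detect_id_column columns out) := by unfold Spec_detect_id_column; infer_instance

-- ===== CLAIM (what is proved, stated in full; the proofs are below) =====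
def Claim_equal_detect_id_column : Prop := ∀ (columns : List String), Dom_detect_id_column columns → Spec_detect_id_column columns (detect_id_column columns)

-- ===== LEMMAS AND PROOFS =====

def pvIdP (c : String) : Bool := PySem.Str.lower c == "id"
def pvFbP (c : String) : Bool :=
  PySem.Str.endswith (PySem.Str.lower c) "_id" ||
    ["sample_id", "mushroom_id", "index"].contains (PySem.Str.lower c)

theorem pvFindPos {a : Type} (p : a → Bool) (x : a) (l : List a) (h : p x = true) :
    (x :: l).find? p = some x := by
  rw [List.find?_cons, h]

theorem pvFindNeg {a : Type} (p : a → Bool) (x : a) (l : List a) (h : p x = false) :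
    (x :: l).find? p = l.find? p := by
  rw [List.find?_cons, h]

theorem contains_lowered (cols : List String) :
    (cols.map (fun c => PySem.Str.lower c)).contains "id" = (cols.find? pvIdP).isSome := by
  induction cols with
  | nil => rfl
  | cons c rest ih =>
    by_cases h : PySem.Str.lower c = "id"
    · rw [List.map_cons, List.contains_cons,
        pvFindPos pvIdP c rest (by simp [pvIdP, h])]
      simp [h]
    · rw [List.map_cons, List.contains_cons,
        pvFindNeg pvIdP c rest (by simp [pvIdP, h])]
      have h2 : ("id" == PySem.Str.lower c) = false := by
        simp only [beq_eq_false_iff_ne, ne_eq]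
        exact fun hh => h hh.symm
      rw [h2, Bool.false_or, ih]

theorem index_get_eq_find (cols : List String) :
    (PySem.List.index? (cols.map (fun c => PySem.Str.lower c)) "id").bind
      (fun i => PySem.List.pyGet? cols (i : Int)) = cols.find? pvIdP := by
  induction cols with
  | nil => rfl
  | cons c rest ih =>
    by_cases h : PySem.Str.lower c = "id"
    · rw [List.map_cons, h, PySem.List.index?_cons_self,
        pvFindPos pvIdP c rest (by simp [pvIdP, h])]
      simp [PySem.List.pyGet?_zero_cons]
    · have hne : PySem.Str.lower c ≠ "id" := h
      rw [List.map_cons, PySem.List.index?_cons_of_ne _ hne,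
        pvFindNeg pvIdP c rest (by simp [pvIdP, h]), ← ih]
      cases hx : PySem.List.index? (rest.map (fun c => PySem.Str.lower c)) "id" with
      | none => simp [hx]
      | some i =>
        simp only [hx, Option.map_some, Option.bind_some]
        rw [show (((i + 1 : Nat)) : Int) = (i : Int) + 1 by push_cast; ring]
        rw [PySem.List.pyGet?_cons_succ]

theorem aloop_eq_find (cols : List String) : detectALoop cols = cols.find? pvFbP := by
  induction cols with
  | nil => rfl
  | cons c rest ih =>
    by_cases h : pvFbP c = true
    · rw [List.find?_cons_of_pos h]
      show (if pvFbP c = true then some c else detectALoop rest) = some c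
      rw [if_pos h]
    · rw [List.find?_cons_of_neg h]
      show (if pvFbP c = true then some c else detectALoop rest) = rest.find? pvFbP
      rw [if_neg h, ih]

theorem A_characterized (cols : List String) :
    detect_id_column cols = (cols.find? pvIdP).or (cols.find? pvFbP) := by
  show (if (cols.map (fun c => PySem.Str.lower c)).contains "id" = true then
          match PySem.List.index? (cols.map (fun c => PySem.Str.lower c)) "id" with
          | some i => PySem.List.pyGet? cols (i : Int)
          | none => none
        else detectALoop cols)
      = (cols.find? pvIdP).or (cols.find? pvFbP)
  rw [contains_lowered, aloop_eq_find]
  cases hf : cols.find? pvIdP with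
  | none => simp
  | some s =>
    have hidx := index_get_eq_find cols
    rw [hf] at hidx
    cases hx : PySem.List.index? (cols.map (fun c => PySem.Str.lower c)) "id" with
    | none => rw [hx] at hidx; simp at hidx
    | some i =>
      rw [hx] at hidx
      simp only [Option.bind_some] at hidx
      simp [hidx]

theorem step_fst_of_ne (im fb : Option String) (c : String)
    (h : ¬ PySem.Str.lower c = "id") : (detectBStep (im, fb) c).1 = im := by
  simp only [detectBStep, beq_iff_eq, if_neg h]
  split <;> rfl

theorem step_snd_of_eq (im fb : Option String) (c : String)
    (h : PySem.Str.lower c = "id") : (detectBStep (im, fb) c).2 = fb := by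
  simp only [detectBStep, beq_iff_eq, if_pos h]
  split <;> rfl

theorem B_fst (cols : List String) : ∀ im fb : Option String,
    (cols.foldl detectBStep (im, fb)).1 = im.or (cols.find? pvIdP) := by
  induction cols with
  | nil => intro im fb; cases im <;> rfl
  | cons c rest ih =>
    intro im fb
    by_cases h : PySem.Str.lower c = "id"
    · rw [pvFindPos pvIdP c rest (by simp [pvIdP, h])]
      cases im with
      | none =>
        have hs : detectBStep (none, fb) c = (some c, fb) := by
          simp [detectBStep, h]
        rw [List.foldl_cons, hs, ih]
        rfl
      | some x =>
        have hs : detectBStep (some x, fb) c = (some x, fb) := by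
          simp [detectBStep, h]
        rw [List.foldl_cons, hs, ih]
        rfl
    · rw [pvFindNeg pvIdP c rest (by simp [pvIdP, h]),
        List.foldl_cons,
        show detectBStep (im, fb) c = (im, (detectBStep (im, fb) c).2) from
          Prod.ext (step_fst_of_ne im fb c h) rfl,
        ih]

theorem B_snd (cols : List String) : ∀ im fb : Option String,
    (cols.foldl detectBStep (im, fb)).2 =
      fb.or (cols.find? (fun c => !pvIdP c && pvFbP c)) := by
  induction cols with
  | nil => intro im fb; cases fb <;> rfl
  | cons c rest ih =>
    intro im fb
    by_cases h : PySem.Str.lower c = "id"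
    · rw [pvFindNeg (fun c => !pvIdP c && pvFbP c) c rest (by simp [pvIdP, h]),
        List.foldl_cons,
        show detectBStep (im, fb) c = ((detectBStep (im, fb) c).1, fb) from
          Prod.ext rfl (step_snd_of_eq im fb c h),
        ih]
    · by_cases hfb : pvFbP c = true
      · rw [pvFindPos (fun c => !pvIdP c && pvFbP c) c rest (by simp [pvIdP, h, hfb])]
        cases fb with
        | none =>
          have hs : detectBStep (im, none) c = (im, some c) := by
            simp only [detectBStep]
            rw [if_neg (show ¬ (PySem.Str.lower c == "id") = true by simpa using h),
              if_pos (show _ = true by rw [Bool.and_eq_true]; exact ⟨rfl, hfb⟩)]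
          rw [List.foldl_cons, hs, ih]
          rfl
        | some x =>
          have hs : detectBStep (im, some x) c = (im, some x) := by
            simp [detectBStep, h]
          rw [List.foldl_cons, hs, ih]
          rfl
      · rw [pvFindNeg (fun c => !pvIdP c && pvFbP c) c rest (by simp [pvIdP, h, hfb])]
        have hs : detectBStep (im, fb) c = (im, fb) := by
          simp only [detectBStep]
          rw [if_neg (show ¬ (PySem.Str.lower c == "id") = true by simpa using h),
            if_neg (fun hcontra => hfb (by rw [Bool.and_eq_true] at hcontra; exact hcontra.2))]
        rw [List.foldl_cons, hs, ih]

theorem find_drop_id (cols : List String) (hnone : cols.find? pvIdP = none) :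
    cols.find? (fun c => !pvIdP c && pvFbP c) = cols.find? pvFbP := by
  induction cols with
  | nil => rfl
  | cons c rest ih =>
    have hc : ¬ pvIdP c = true := by
      intro hc2
      rw [pvFindPos pvIdP c rest hc2] at hnone
      exact Option.some_ne_none _ hnone
    have hrest : rest.find? pvIdP = none := by
      rwa [pvFindNeg pvIdP c rest (by simp [hc])] at hnone
    by_cases hfb : pvFbP c = true
    · rw [pvFindPos (fun c => !pvIdP c && pvFbP c) c rest (by simp [hc, hfb]),
        pvFindPos pvFbP c rest hfb]
    · rw [pvFindNeg (fun c => !pvIdP c && pvFbP c) c rest (by simp [hc, hfb]),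
        pvFindNeg pvFbP c rest (by simp [hfb]), ih hrest]

theorem B_characterized (cols : List String) :
    detect_id_column_alt cols
      = (cols.find? pvIdP).or (cols.find? (fun c => !pvIdP c && pvFbP c)) := by
  show (match (cols.foldl detectBStep (none, none)).1 with
        | some s => some s
        | none => (cols.foldl detectBStep (none, none)).2) = _
  have h1 := B_fst cols none none
  have h2 := B_snd cols none none
  simp only [Option.none_or] at h1 h2
  rw [h1, h2]
  cases cols.find? pvIdP <;> rfl

-- ===== VERDICT (by name: the statement is the Claim_ definition above) =====
theorem detect_id_column_spec : Claim_equal_detect_id_column := by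
  intro cols _
  unfold Spec_detect_id_column
  rw [A_characterized, B_characterized]
  cases hf : cols.find? pvIdP with
  | none => rw [find_drop_id cols hf]
  | some s => rfl
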